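-- pv_equiv track=rewrite | github.com/BentleySystems/MicroStationPython | MSPythonTests/PlatformTests/PublishedTests/DgnPlatformTest/MeshHandlerUtils.py | PushIndices
-- ===== SOURCE A (Python) =====
-- def PushIndices( dest, indices, count, padToMaxFaceSize):
--     numPerFace = 0
--     if padToMaxFaceSize:
--         maxCount = 0
--         currCount = 0;
--         for i in range(0, count):
--             if indices[i] == 0:
--                 if currCount > maxCount:
--                     maxCount = currCount
--                 currCount = 0
--             else:
--                 currCount += 1
--         numPerFace = maxCount
--         currCount = 0;
--         for i in range(0, count):
--             if indices[i] == 0: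
--                 while (currCount < maxCount):
--                     dest.append(0)
--                     currCount += 1
--                 currCount = 0
--             else:
--                 currCount += 1
--                 dest.append(indices[i]);
--     else:
--         for i in range(0, count):
--             dest.append(indices[i])
--         numPerFace = 0
--     return numPerFace
-- ===== SOURCE B (Python) =====
-- def PushIndices(dest, indices, count, padToMaxFaceSize):
--     prefix = indices[:max(count, 0)]
--     if not padToMaxFaceSize:
--         dest.extend(prefix)
--         return 0
--     # group the prefix into face segments: (non-zero indices, zero-terminated?)
--     segs = []
--     cur = []
--     for x in prefix:
--         if x == 0:
--             segs.append((cur, True))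
--             cur = []
--         else:
--             cur.append(x)
--     if cur:
--         segs.append((cur, False))
--     maxCount = max((len(s) for s, t in segs if t), default=0)
--     for s, t in segs:
--         dest.extend(s)
--         if t:
--             dest.extend([0] * (maxCount - len(s)))
--     return maxCount
-- ===== Notes on version B (the rewrite author's own statement) =====
-- stated objective: alternative
-- what changed: A makes two index loops over range(count) (a run-length scan for maxCount, then an interleaved append-and-pad loop with a while); B slices the prefix once, groups it into (segment, terminated) pairs in a single pass, takes the max over terminated segments, and pads per segment with list arithmetic.
import Mathlib
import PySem

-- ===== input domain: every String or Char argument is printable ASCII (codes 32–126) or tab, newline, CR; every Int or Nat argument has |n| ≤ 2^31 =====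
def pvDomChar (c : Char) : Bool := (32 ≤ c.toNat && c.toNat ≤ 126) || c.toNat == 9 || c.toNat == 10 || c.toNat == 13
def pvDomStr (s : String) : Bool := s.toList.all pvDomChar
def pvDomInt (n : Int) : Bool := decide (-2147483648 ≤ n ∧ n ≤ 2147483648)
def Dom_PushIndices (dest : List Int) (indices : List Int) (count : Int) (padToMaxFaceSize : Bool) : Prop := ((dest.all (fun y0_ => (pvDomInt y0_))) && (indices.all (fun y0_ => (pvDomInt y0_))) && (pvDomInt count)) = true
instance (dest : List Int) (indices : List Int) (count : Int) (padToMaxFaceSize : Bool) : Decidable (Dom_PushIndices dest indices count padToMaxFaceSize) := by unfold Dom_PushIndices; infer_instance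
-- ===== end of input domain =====

-- B replaces A's two index loops with one grouping pass into (segment, terminated) pairs (objective: alternative decomposition).
-- Python A and B both mutate dest in place (the same way); the equivalence proved here is about the RETURN value only —
-- the dest-building folds are kept in the ports for fidelity but their results are unused.

-- ===== PORT A =====
def PushIndices (dest : List Int) (indices : List Int) (count : Int) (padToMaxFaceSize : Bool) : Int :=
  if padToMaxFaceSize then
    -- first loop: maxCount/currCount scan
    let s := (PySem.List.pyRange 0 count 1).foldl
      (fun (st : Int × Int) i =>
        if PySem.List.pyGetD indices i 0 == 0 then
          (if st.2 > st.1 then st.2 else st.1, 0)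
        else
          (st.1, st.2 + 1)) (0, 0)
    let numPerFace := s.1
    -- second loop: only appends to dest (the in-place mutation; its while-loop pads with zeros); result unused
    let _ := (PySem.List.pyRange 0 count 1).foldl
      (fun (st : List Int × Int) i =>
        if PySem.List.pyGetD indices i 0 == 0 then
          (st.1 ++ List.replicate (numPerFace - st.2).toNat 0, 0)
        else
          (st.1 ++ [PySem.List.pyGetD indices i 0], st.2 + 1)) (dest, 0)
    numPerFace
  else
    -- plain copy loop: only appends to dest; result unused
    let _ := (PySem.List.pyRange 0 count 1).foldl
      (fun (d : List Int) i => d ++ [PySem.List.pyGetD indices i 0]) dest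
    0

-- ===== PORT B =====
-- group a prefix into face segments: (list of non-zero indices, ended-with-0?)
def pvSegments (pfx : List Int) : List (List Int × Bool) :=
  let st := pfx.foldl
    (fun (st : List (List Int × Bool) × List Int) x =>
      if x == 0 then (st.1 ++ [(st.2, true)], []) else (st.1, st.2 ++ [x])) ([], [])
  if st.2.isEmpty then st.1 else st.1 ++ [(st.2, false)]

def PushIndices_alt (dest : List Int) (indices : List Int) (count : Int) (padToMaxFaceSize : Bool) : Int :=
  let pfx := PySem.List.slice indices none (some (max count 0))
  if !padToMaxFaceSize then
    let _ := dest ++ pfx   -- dest.extend(prefix): mutation only, result unused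
    0
  else
    let segs := pvSegments pfx
    let maxCount := segs.foldl
      (fun (m : Int) (s : List Int × Bool) => if s.2 then max m (s.1.length : Int) else m) 0
    -- dest.extend per segment, padding terminated ones: mutation only, result unused
    let _ := segs.foldl
      (fun (d : List Int) (s : List Int × Bool) =>
        if s.2 then d ++ s.1 ++ List.replicate (maxCount - (s.1.length : Int)).toNat 0
        else d ++ s.1) dest
    maxCount

-- ===== PRECONDITION & SPEC =====
-- Pre_ excludes exactly the inputs where A raises IndexError: count > len(indices).
def Pre_PushIndices (dest : List Int) (indices : List Int) (count : Int) (padToMaxFaceSize : Bool) : Prop :=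
  count ≤ (indices.length : Int)
instance (dest : List Int) (indices : List Int) (count : Int) (padToMaxFaceSize : Bool) : Decidable (Pre_PushIndices dest indices count padToMaxFaceSize) := by unfold Pre_PushIndices; infer_instance

def pvWitness_PushIndices : List Int × List Int × Int × Bool := ([7], [1, 2, 0, 3], 3, true)

def Spec_PushIndices (dest : List Int) (indices : List Int) (count : Int) (padToMaxFaceSize : Bool) (out : Int) : Prop := out = PushIndices_alt dest indices count padToMaxFaceSize
instance (dest : List Int) (indices : List Int) (count : Int) (padToMaxFaceSize : Bool) (out : Int) : Decidable (Spec_PushIndices dest indices count padToMaxFaceSize out) := by unfold Spec_PushIndices; infer_instance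

-- ===== CLAIM (what is proved, stated in full; the proofs are below) =====
def Claim_equal_PushIndices : Prop := ∀ (dest : List Int) (indices : List Int) (count : Int) (padToMaxFaceSize : Bool), Dom_PushIndices dest indices count padToMaxFaceSize → Pre_PushIndices dest indices count padToMaxFaceSize → Spec_PushIndices dest indices count padToMaxFaceSize (PushIndices dest indices count padToMaxFaceSize)
-- ===== LEMMAS AND PROOFS =====
-- A's first-loop step, on the state (maxCount, currCount)
def pvStepA (st : Int × Int) (v : Int) : Int × Int :=
  if v == 0 then (if st.2 > st.1 then st.2 else st.1, 0) else (st.1, st.2 + 1)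

-- B's grouping step, on the state (segments so far, current segment)
def pvStepB (st : List (List Int × Bool) × List Int) (x : Int) : List (List Int × Bool) × List Int :=
  if x == 0 then (st.1 ++ [(st.2, true)], []) else (st.1, st.2 ++ [x])

-- B's max over terminated segments, folded from m
def pvGM (segs : List (List Int × Bool)) (m : Int) : Int :=
  segs.foldl (fun (m : Int) (s : List Int × Bool) => if s.2 then max m (s.1.length : Int) else m) m

theorem pvGM_append (segs : List (List Int × Bool)) (c : List Int) (t : Bool) (m : Int) :
    pvGM (segs ++ [(c, t)]) m = if t then max (pvGM segs m) (c.length : Int) else pvGM segs m := by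
  simp [pvGM, List.foldl_append]

theorem pv_core (l : List Int) : ∀ (segs : List (List Int × Bool)) (cur : List Int) (m : Int),
    pvGM ((l.foldl pvStepB (segs, cur)).1) m
      = (l.foldl pvStepA (pvGM segs m, (cur.length : Int))).1 := by
  induction l with
  | nil => intro segs cur m; rfl
  | cons x xs ih =>
    intro segs cur m
    by_cases hx : x = 0
    · subst hx
      simp only [List.foldl_cons, pvStepB, pvStepA, BEq.rfl, if_true]
      rw [ih, pvGM_append]
      have hmax : max (pvGM segs m) ((cur.length : Nat) : Int)
          = if ((cur.length : Nat) : Int) > pvGM segs m then ((cur.length : Nat) : Int) else pvGM segs m := by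
        split_ifs <;> omega
      simp [hmax]
    · have hb : (x == (0 : Int)) = false := by simpa using hx
      simp only [List.foldl_cons, pvStepB, pvStepA, hb]
      rw [ih]
      norm_num

-- B's returned maxCount, computed from pvSegments, equals A's first-loop scan over the same list
theorem pv_alt_core (l : List Int) :
    pvGM (pvSegments l) 0 = (l.foldl pvStepA (0, 0)).1 := by
  have hfold : l.foldl
      (fun (st : List (List Int × Bool) × List Int) x =>
        if x == 0 then (st.1 ++ [(st.2, true)], []) else (st.1, st.2 ++ [x])) ([], [])
      = l.foldl pvStepB ([], []) := rfl
  unfold pvSegments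
  simp only [hfold]
  have hcore := pv_core l [] [] 0
  by_cases h : (l.foldl pvStepB ([], [])).2.isEmpty
  · simpa [h, pvGM] using hcore
  · simp only [h, Bool.false_eq_true, if_false]
    rw [pvGM_append]
    simpa [pvGM] using hcore

-- A's pyRange/pyGetD scan equals the list scan over indices.take count.toNat (under Pre_)
theorem pvA_fold (indices : List Int) (count : Int) (h : count ≤ (indices.length : Int)) :
    (PySem.List.pyRange 0 count 1).foldl
      (fun (st : Int × Int) i => pvStepA st (PySem.List.pyGetD indices i 0)) (0, 0)
      = (indices.take count.toNat).foldl pvStepA (0, 0) := by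
  by_cases hc : 0 ≤ count
  · have hlen : (((indices.take count.toNat).length : Nat) : Int) = count := by
      simp [List.length_take]; omega
    have hcongr : (PySem.List.pyRange 0 count 1).foldl
        (fun (st : Int × Int) i => pvStepA st (PySem.List.pyGetD indices i 0)) (0, 0)
        = (PySem.List.pyRange 0 count 1).foldl
        (fun (st : Int × Int) i => pvStepA st (PySem.List.pyGetD (indices.take count.toNat) i 0)) (0, 0) := by
      apply PySem.List.foldl_congr_mem
      intro acc i hi
      rw [PySem.List.mem_pyRange_one] at hi
      congr 1
      rw [PySem.List.pyGetD_eq_getElem indices 0 hi.1 (by omega),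
          PySem.List.pyGetD_eq_getElem (indices.take count.toNat) 0 hi.1 (by omega)]
      exact (List.getElem_take).symm
    have hfold := PySem.List.foldl_pyRange_pyGetD' (indices.take count.toNat) 0 pvStepA (0, 0) le_rfl
    rw [hlen] at hfold
    rw [hcongr, hfold]
    simp
  · rw [PySem.List.pyRange_one_eq_nil (by omega)]
    have : count.toNat = 0 := by omega
    simp [this]
-- ===== VERDICT (by name: the statement is the Claim_ definition above) =====
theorem PushIndices_spec : Claim_equal_PushIndices := by
  intro dest indices count pad _ hpre
  unfold Spec_PushIndices PushIndices PushIndices_alt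
  cases pad
  · simp
  · simp only [Bool.not_true, if_true, Bool.false_eq_true]
    have hpfx : PySem.List.slice indices none (some (max count 0)) = indices.take count.toNat := by
      rw [PySem.List.slice_to indices (le_max_right _ _)]
      congr 1
      omega
    have hA := pvA_fold indices count hpre
    have hB := pv_alt_core (indices.take count.toNat)
    simp only [hpfx]
    show (List.foldl (fun (st : Int × Int) i => pvStepA st (PySem.List.pyGetD indices i 0)) (0, 0)
        (PySem.List.pyRange 0 count 1)).1
      = pvGM (pvSegments (indices.take count.toNat)) 0
    rw [hA, hB]
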